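-- pv_equiv track=rewrite | github.com/Light2Dark/advent_of_code_2022 | day3/main.py | calc_priority_score
-- ===== SOURCE A (Python) =====
-- def calc_priority_score(common_letters):
--     val = 0
--     for letter in common_letters:
--         if ord(letter) >= ord('a'):
--             val += ord(letter) - 96 # small letters start from 1
--         else:
--             val += ord(letter) - 38 # capital letters start from 27
--     return val
-- ===== SOURCE B (Python) =====
-- def calc_priority_score(common_letters):
--     total = sum(ord(c) for c in common_letters)
--     lower = sum(1 for c in common_letters if ord(c) >= 97)
--     upper = len(common_letters) - lower
--     return total - 96 * lower - 38 * upper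
-- ===== Notes on version B (the rewrite author's own statement) =====
-- stated objective: alternative
-- what changed: Replaces A's per-character branch-and-accumulate loop with three aggregate passes (sum of code points, count of lowercase-range chars, length) combined by one closed-form arithmetic expression.
import Mathlib
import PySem

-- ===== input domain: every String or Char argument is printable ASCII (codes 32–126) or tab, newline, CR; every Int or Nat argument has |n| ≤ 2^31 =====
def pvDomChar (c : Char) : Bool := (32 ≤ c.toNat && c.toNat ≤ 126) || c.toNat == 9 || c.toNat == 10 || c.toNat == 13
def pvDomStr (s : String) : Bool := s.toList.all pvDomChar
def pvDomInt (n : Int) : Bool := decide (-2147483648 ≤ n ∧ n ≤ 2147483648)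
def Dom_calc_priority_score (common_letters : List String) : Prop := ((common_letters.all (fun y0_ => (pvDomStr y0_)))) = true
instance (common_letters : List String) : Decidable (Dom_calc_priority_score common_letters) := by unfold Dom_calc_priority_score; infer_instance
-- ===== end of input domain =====

-- B computes the same sum by aggregate passes instead of A's per-character branch-and-add loop; equivalence of the return values.

-- ===== PORT A =====
-- ord(letter) for a one-character string (Pre_ restricts to length-1 strings, where this is exact)
def pvOrdA (s : String) : Int :=
  match s.toList with
  | [c] => (c.toNat : Int)
  | _ => 0

def calc_priority_score (common_letters : List String) : Int :=
  common_letters.foldl (fun val letter =>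
    if pvOrdA letter ≥ 97 then val + (pvOrdA letter - 96)
    else val + (pvOrdA letter - 38)) 0

-- ===== PORT B =====
-- same ord on length-1 strings (B's own helper)
def pvOrdB (s : String) : Int :=
  match s.toList with
  | [c] => (c.toNat : Int)
  | _ => 0

def calc_priority_score_alt (common_letters : List String) : Int :=
  let total := (common_letters.map pvOrdB).sum
  let lower : Int := ((common_letters.filter (fun c => pvOrdB c ≥ 97)).length : Int)
  let upper : Int := (common_letters.length : Int) - lower
  total - 96 * lower - 38 * upper

-- ===== PRECONDITION & SPEC =====
-- Pre_ excludes inputs where ord() raises TypeError: every element must be a one-character string.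
def Pre_calc_priority_score (common_letters : List String) : Prop :=
  ∀ s ∈ common_letters, s.toList.length = 1
instance (common_letters : List String) : Decidable (Pre_calc_priority_score common_letters) := by
  unfold Pre_calc_priority_score; infer_instance

def pvWitness_calc_priority_score : List String := ["a", "Z", "%"]

def Spec_calc_priority_score (common_letters : List String) (out : Int) : Prop := out = calc_priority_score_alt common_letters
instance (common_letters : List String) (out : Int) : Decidable (Spec_calc_priority_score common_letters out) := by unfold Spec_calc_priority_score; infer_instance

-- ===== CLAIM (what is proved, stated in full; the proofs are below) =====
def Claim_equal_calc_priority_score : Prop := ∀ (common_letters : List String), Dom_calc_priority_score common_letters → Pre_calc_priority_score common_letters → Spec_calc_priority_score common_letters (calc_priority_score common_letters)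

-- ===== LEMMAS AND PROOFS =====
theorem pvOrd_eq (s : String) : pvOrdA s = pvOrdB s := rfl

theorem foldA_shift (cl : List String) (val : Int) :
    cl.foldl (fun val letter =>
      if pvOrdA letter ≥ 97 then val + (pvOrdA letter - 96)
      else val + (pvOrdA letter - 38)) val
    = val + (cl.map pvOrdB).sum
      - 96 * ((cl.filter (fun c => pvOrdB c ≥ 97)).length : Int)
      - 38 * ((cl.length : Int) - ((cl.filter (fun c => pvOrdB c ≥ 97)).length : Int)) := by
  induction cl generalizing val with
  | nil => simp
  | cons h t ih =>
    by_cases hc : pvOrdA h ≥ 97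
    · have hd : decide (pvOrdB h ≥ 97) = true := decide_eq_true hc
      rw [List.foldl_cons, if_pos hc, ih]
      simp only [List.map_cons, List.sum_cons, List.filter_cons, hd, pvOrd_eq, if_true, List.length_cons]
      push_cast
      ring
    · have hd : decide (pvOrdB h ≥ 97) = false := decide_eq_false hc
      rw [List.foldl_cons, if_neg hc, ih]
      simp only [List.map_cons, List.sum_cons, List.filter_cons, hd, pvOrd_eq, Bool.false_eq_true,
        if_false, List.length_cons]
      push_cast
      ring

-- ===== VERDICT (by name: the statement is the Claim_ definition above) =====
theorem calc_priority_score_spec : Claim_equal_calc_priority_score := by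
  intro cl _ _
  unfold Spec_calc_priority_score calc_priority_score calc_priority_score_alt
  rw [foldA_shift]
  ring
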